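-- pv_equiv track=rewrite | github.com/HaodongBAI/EventCausalityNetworks | text/news2company.py | anno_com_align_logic
-- ===== SOURCE A (Python) =====
-- def anno_com_align_logic(company, headline, story):
--     res = []
--     headline = headline.replace(" ", "")
--     story = story.replace(" ", "")
--     for (cd, short, full) in company:
--         if short in headline or short in story or full in headline or full in story:
--             res.append(cd)
--             continue
--     return res
-- ===== SOURCE B (Python) =====
-- def anno_com_align_logic(company, headline, story):
--     # Build an index of all text substrings whose length occurs among the
--     # patterns, then answer each company lookup by set membership.
--     texts = (headline.replace(" ", ""), story.replace(" ", ""))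
--     lengths = {len(p) for (_, s, f) in company for p in (s, f)}
--     subs = {t[i:i + L] for L in lengths for t in texts
--             for i in range(len(t) - L + 1)}
--     return [cd for (cd, s, f) in company if s in subs or f in subs]
-- ===== Notes on version B (the rewrite author's own statement) =====
-- stated objective: alternative
-- what changed: Instead of scanning both texts per company, B builds one substring index (the set of all text substrings of the occurring pattern lengths) and answers each company by two set-membership lookups.
import Mathlib
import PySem

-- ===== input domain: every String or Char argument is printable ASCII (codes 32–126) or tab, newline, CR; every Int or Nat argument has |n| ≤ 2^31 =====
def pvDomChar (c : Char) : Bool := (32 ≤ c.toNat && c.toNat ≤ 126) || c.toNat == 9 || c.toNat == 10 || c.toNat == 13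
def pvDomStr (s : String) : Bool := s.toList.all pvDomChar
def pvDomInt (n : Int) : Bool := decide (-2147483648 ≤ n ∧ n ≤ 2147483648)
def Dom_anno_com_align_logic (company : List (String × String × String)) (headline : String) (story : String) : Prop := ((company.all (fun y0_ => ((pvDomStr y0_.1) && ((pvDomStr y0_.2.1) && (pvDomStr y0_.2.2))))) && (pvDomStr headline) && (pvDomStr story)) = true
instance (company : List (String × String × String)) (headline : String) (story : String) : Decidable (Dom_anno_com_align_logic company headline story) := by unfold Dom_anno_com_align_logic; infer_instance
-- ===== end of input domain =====

-- B replaces A's per-company substring scans of both texts by a substring index (a set of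
-- all text substrings of the occurring pattern lengths) queried twice per company;
-- alternative structure, same exact result.

-- ===== PORT A =====
def anno_com_align_logic (company : List (String × String × String)) (headline : String) (story : String) : List String :=
  let headline := PySem.Str.replace headline " " ""
  let story := PySem.Str.replace story " " ""
  company.foldl (fun res c =>
    if PySem.Str.isIn c.2.1 headline || PySem.Str.isIn c.2.1 story
        || PySem.Str.isIn c.2.2 headline || PySem.Str.isIn c.2.2 story then
      res ++ [c.1]
    else res) []

-- ===== PORT B =====
def anno_com_align_logic_alt (company : List (String × String × String)) (headline : String) (story : String) : List String :=
  let texts : List String := [PySem.Str.replace headline " " "", PySem.Str.replace story " " ""]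
  let lengths : PySem.Set Int :=
    PySem.Set.ofList (company.flatMap (fun c => [PySem.Str.len c.2.1, PySem.Str.len c.2.2]))
  let subs : PySem.Set String :=
    PySem.Set.ofList (lengths.flatMap (fun L => texts.flatMap (fun t =>
      (PySem.List.pyRange 0 (PySem.Str.len t - L + 1) 1).map
        (fun i => PySem.Str.slice t (some i) (some (i + L))))))
  (company.filter (fun c => PySem.Set.contains subs c.2.1 || PySem.Set.contains subs c.2.2)).map (fun c => c.1)

-- ===== PRECONDITION & SPEC =====
def Spec_anno_com_align_logic (company : List (String × String × String)) (headline : String) (story : String) (out : List String) : Prop := out = anno_com_align_logic_alt company headline story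
instance (company : List (String × String × String)) (headline : String) (story : String) (out : List String) : Decidable (Spec_anno_com_align_logic company headline story out) := by unfold Spec_anno_com_align_logic; infer_instance

-- ===== CLAIM (what is proved, stated in full; the proofs are below) =====
def Claim_equal_anno_com_align_logic : Prop := ∀ (company : List (String × String × String)) (headline : String) (story : String), Dom_anno_com_align_logic company headline story → Spec_anno_com_align_logic company headline story (anno_com_align_logic company headline story)

-- ===== LEMMAS AND PROOFS =====

-- Every slice generated by the index build is an infix of its text.
lemma slice_of_mem_range_infix (t : List Char) (L : Int) (hL : 0 ≤ L) (q : List Char)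
    (h : q ∈ (PySem.List.pyRange 0 ((t.length : Int) - L + 1) 1).map
      (fun i => PySem.List.slice t (some i) (some (i + L)))) : q <:+: t := by
  rcases List.mem_map.mp h with ⟨i, hi, rfl⟩
  have hb := PySem.List.mem_pyRange_one.mp hi
  rw [PySem.List.slice_toNat t hb.1 (by omega)]
  exact ((List.take_prefix _ _).isInfix).trans (List.drop_suffix _ t).isInfix

-- Every infix of the text occurs among the generated slices of its own length.
lemma infix_mem_slices (t p : List Char) (h : p <:+: t) :
    p ∈ (PySem.List.pyRange 0 ((t.length : Int) - (p.length : Int) + 1) 1).map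
      (fun i => PySem.List.slice t (some i) (some (i + (p.length : Int)))) := by
  rcases h with ⟨s, u, rfl⟩
  refine List.mem_map.mpr ⟨(s.length : Int), ?_, ?_⟩
  · refine PySem.List.mem_pyRange_one.mpr ⟨by positivity, ?_⟩
    have : s.length + p.length ≤ (s ++ p ++ u).length := by simp
    push_cast at this ⊢; omega
  · rw [PySem.List.slice_natCast_add]
    simp

-- The index answers exactly A's double containment test, for patterns whose length is indexed.
lemma contains_index_eq (lens : List Int) (h' s' p : String)
    (hp : PySem.Str.len p ∈ lens) (hlens : ∀ L ∈ lens, 0 ≤ L) :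
    PySem.Set.contains (PySem.Set.ofList ((PySem.Set.ofList lens).flatMap (fun L =>
      [h', s'].flatMap (fun t =>
        (PySem.List.pyRange 0 (PySem.Str.len t - L + 1) 1).map
          (fun i => PySem.Str.slice t (some i) (some (i + L))))))) p
    = (PySem.Str.isIn p h' || PySem.Str.isIn p s') := by
  rw [Bool.eq_iff_iff, PySem.Set.contains_iff, PySem.Set.mem_ofList, List.mem_flatMap]
  constructor
  · rintro ⟨L, hL, hmem⟩
    rw [List.mem_flatMap] at hmem
    rcases hmem with ⟨t, ht, hmem⟩
    have hL0 : 0 ≤ L := hlens L ((PySem.Set.mem_ofList _ _).mp hL)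
    have hinf : p.toList <:+: t.toList := by
      apply slice_of_mem_range_infix t.toList L hL0
      rcases List.mem_map.mp hmem with ⟨i, hi, heq⟩
      refine List.mem_map.mpr ⟨i, ?_, ?_⟩
      · rwa [PySem.Str.len_eq] at hi
      · rw [← heq, PySem.Str.toList_slice, PySem.Chars.slice_eq_listSlice]
    simp only [List.mem_cons] at ht
    rcases ht with rfl | rfl | h0
    · simp only [Bool.or_eq_true, PySem.Str.isIn_iff_infix]; exact Or.inl hinf
    · simp only [Bool.or_eq_true, PySem.Str.isIn_iff_infix]; exact Or.inr hinf
    · cases h0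
  · intro hor
    refine ⟨PySem.Str.len p, PySem.Set.mem_ofList _ _ |>.mpr hp, ?_⟩
    rw [List.mem_flatMap]
    have key : ∀ t : String, p.toList <:+: t.toList →
        p ∈ (PySem.List.pyRange 0 (PySem.Str.len t - PySem.Str.len p + 1) 1).map
          (fun i => PySem.Str.slice t (some i) (some (i + PySem.Str.len p))) := by
      intro t hinf
      have := infix_mem_slices t.toList p.toList hinf
      rcases List.mem_map.mp this with ⟨i, hi, heq⟩
      refine List.mem_map.mpr ⟨i, ?_, ?_⟩
      · rwa [PySem.Str.len_eq, PySem.Str.len_eq]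
      · apply String.toList_inj.mp
        rw [PySem.Str.toList_slice, PySem.Chars.slice_eq_listSlice, PySem.Str.len_eq]
        exact heq
    rcases Bool.or_eq_true_iff.mp hor with hh | hs
    · exact ⟨h', by simp, key h' ((PySem.Str.isIn_iff_infix _ _).mp hh)⟩
    · exact ⟨s', by simp, key s' ((PySem.Str.isIn_iff_infix _ _).mp hs)⟩

-- ===== VERDICT (by name: the statement is the Claim_ definition above) =====
theorem anno_com_align_logic_spec : Claim_equal_anno_com_align_logic := by
  intro company headline story _
  show _ = _
  unfold anno_com_align_logic anno_com_align_logic_alt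
  rw [PySem.List.foldl_append_if
    (p := fun c : String × String × String =>
      PySem.Str.isIn c.2.1 (PySem.Str.replace headline " " "") || PySem.Str.isIn c.2.1 (PySem.Str.replace story " " "")
        || PySem.Str.isIn c.2.2 (PySem.Str.replace headline " " "") || PySem.Str.isIn c.2.2 (PySem.Str.replace story " " ""))
    (f := fun c => c.1)]
  rw [List.nil_append]
  congr 1
  apply List.filter_congr
  intro c hc
  have hlens : ∀ L ∈ company.flatMap (fun c => [PySem.Str.len c.2.1, PySem.Str.len c.2.2]), 0 ≤ L := by
    intro L hL
    rcases List.mem_flatMap.mp hL with ⟨d, _, hm⟩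
    simp only [List.mem_cons, List.not_mem_nil, or_false] at hm
    rcases hm with rfl | rfl <;> rw [PySem.Str.len_eq] <;> positivity
  rw [contains_index_eq _ _ _ _ (List.mem_flatMap.mpr ⟨c, hc, by simp⟩) hlens,
      contains_index_eq _ _ _ _ (List.mem_flatMap.mpr ⟨c, hc, by simp⟩) hlens]
  cases PySem.Str.isIn c.2.1 (PySem.Str.replace headline " " "") <;>
    cases PySem.Str.isIn c.2.1 (PySem.Str.replace story " " "") <;>
    cases PySem.Str.isIn c.2.2 (PySem.Str.replace headline " " "") <;>
    cases PySem.Str.isIn c.2.2 (PySem.Str.replace story " " "") <;> rfl
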